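-- pv_equiv track=rewrite | github.com/armanSingh/file-downloader | webPicsDownlaoder.py | returnLinks
-- ===== SOURCE A (Python) =====
-- def returnProperLinks(linkPics):
--     properLinks = []
--     for currentLink in linkPics:
--         if currentLink.find(".jpg") != -1:
--             properLinks.append(currentLink)
--             properLinks.append(currentLink)
--     return properLinks
--
-- def returnLinks(html):
--     stringToFind = '<a href='
--     endPos = 0
--     linkPics=[]
--     while 1:
--         startPos = html.find(stringToFind,endPos)
--         if(startPos == -1):
--             break
--         startPos = html.find('"', startPos)
--         endPos = html.find('"', startPos+1)
--         link = html[startPos+1:endPos]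
--         linkPics.append(link)
--
--     return returnProperLinks(linkPics)
-- ===== SOURCE B (Python) =====
-- def hasJpg(text):
--     return '.jpg' in text
--
-- def returnLinks(html):
--     def nextLink(searchFrom):
--         anchorPos = html.find('<a href=', searchFrom)
--         if anchorPos == -1:
--             return None
--         openQuote = html.find('"', anchorPos)
--         closeQuote = html.find('"', openQuote + 1)
--         return html[openQuote + 1:closeQuote], closeQuote
--
--     result = []
--     hit = nextLink(0)
--     while hit is not None:
--         link, resumePos = hit
--         if hasJpg(link):
--             result += [link, link]
--         hit = nextLink(resumePos)
--     return result
-- ===== Notes on version B (the rewrite author's own statement) =====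
-- stated objective: simpler
-- what changed: B factors link extraction into a nextLink helper producing (link, resumePos) states and drives it as a single stream loop that filters and double-appends each matching link on the fly, eliminating A's intermediate linkPics list and the separate returnProperLinks filter pass.
import Mathlib
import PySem

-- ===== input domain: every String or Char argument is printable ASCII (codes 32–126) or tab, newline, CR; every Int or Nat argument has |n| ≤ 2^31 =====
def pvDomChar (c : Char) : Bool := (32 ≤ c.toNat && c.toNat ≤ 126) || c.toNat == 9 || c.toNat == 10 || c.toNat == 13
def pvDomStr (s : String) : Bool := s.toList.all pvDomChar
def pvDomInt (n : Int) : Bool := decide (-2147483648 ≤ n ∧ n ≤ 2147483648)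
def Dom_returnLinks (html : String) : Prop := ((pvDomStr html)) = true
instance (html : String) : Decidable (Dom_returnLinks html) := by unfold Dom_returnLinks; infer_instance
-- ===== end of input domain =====

-- B factors extraction into a nextLink producer of (link, resumePos) states and fuses the
-- jpg filter with the double-append into the driving loop, dropping A's intermediate list and
-- second pass (objective: simpler).
-- ===== PORT A =====
def returnProperLinksA (linkPics : List String) : List String :=
  linkPics.foldl
    (fun properLinks currentLink =>
      if PySem.Str.find currentLink ".jpg" ≠ -1 then properLinks ++ [currentLink, currentLink]
      else properLinks) []

-- the while-loop of A; fuel only makes the recursion total (it suffices whenever the Python loop terminates)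
def returnLinksLoopA (html : String) (fuel : Nat) (endPos : Int) (linkPics : List String) : List String :=
  match fuel with
  | 0 => linkPics
  | fuel + 1 =>
    let startPos := PySem.Str.findFrom html "<a href=" endPos
    if startPos = -1 then linkPics
    else
      let startPos' := PySem.Str.findFrom html "\"" startPos
      let endPos' := PySem.Str.findFrom html "\"" (startPos' + 1)
      let link := PySem.Str.slice html (some (startPos' + 1)) (some endPos')
      returnLinksLoopA html fuel endPos' (linkPics ++ [link])

def returnLinks (html : String) : List String :=
  returnProperLinksA (returnLinksLoopA html (html.toList.length + 4) 0 [])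

-- ===== PORT B =====
-- B's jpg test
def hasJpg (text : String) : Bool := PySem.Str.isIn ".jpg" text

-- B's nextLink helper: the next extracted link together with the position to resume from, or none
def nextLinkB (s : String) (searchFrom : Int) : Option (String × Int) :=
  let anchorPos := PySem.Str.findFrom s "<a href=" searchFrom
  if anchorPos = -1 then none
  else
    let openQuote := PySem.Str.findFrom s "\"" anchorPos
    let closeQuote := PySem.Str.findFrom s "\"" (openQuote + 1)
    some (PySem.Str.slice s (some (openQuote + 1)) (some closeQuote), closeQuote)

-- B's while loop over the stream of nextLink states; gas only makes the recursion total
def returnLinksLoopB (s : String) (gas : Nat) (hit : Option (String × Int)) (result : List String) : List String :=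
  match gas, hit with
  | 0, _ => result
  | _ + 1, none => result
  | gas + 1, some (link, resumePos) =>
    returnLinksLoopB s gas (nextLinkB s resumePos)
      (if hasJpg link then result ++ [link, link] else result)

def returnLinks_alt (html : String) : List String :=
  returnLinksLoopB html (html.toList.length + 4) (nextLinkB html 0) []

-- ===== PRECONDITION & SPEC =====
-- (no Pre_: the fueled ports agree on every input; on htmls where the Python loop never
-- terminates neither Python returns, and the equivalence below is the ports' statement)
def Spec_returnLinks (html : String) (out : List String) : Prop := out = returnLinks_alt html
instance (html : String) (out : List String) : Decidable (Spec_returnLinks html out) := by unfold Spec_returnLinks; infer_instance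

-- ===== CLAIM (what is proved, stated in full; the proofs are below) =====
def Claim_equal_returnLinks : Prop := ∀ (html : String), Dom_returnLinks html → Spec_returnLinks html (returnLinks html)

-- ===== LEMMAS AND PROOFS =====
theorem returnProperLinksA_concat (xs : List String) (x : String) :
    returnProperLinksA (xs ++ [x]) =
      if PySem.Str.find x ".jpg" ≠ -1 then returnProperLinksA xs ++ [x, x]
      else returnProperLinksA xs := by
  simp [returnProperLinksA, List.foldl_append]

theorem jpg_test_eq (l : String) :
    (hasJpg l = true) ↔ PySem.Str.find l ".jpg" ≠ -1 := by
  rw [hasJpg, PySem.Str.isIn_iff_infix, ← PySem.Str.find_ne_neg_one_iff]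

theorem push_proper (l : String) (acc : List String) :
    (if hasJpg l = true then returnProperLinksA acc ++ [l, l]
     else returnProperLinksA acc) = returnProperLinksA (acc ++ [l]) := by
  rw [returnProperLinksA_concat]
  by_cases hj : hasJpg l = true
  · rw [if_pos hj, if_pos ((jpg_test_eq l).mp hj)]
  · rw [if_neg hj, if_neg (fun hf => hj ((jpg_test_eq l).mpr hf))]

theorem loop_fusion (html : String) (fuel : Nat) :
    ∀ (endPos : Int) (acc : List String),
      returnLinksLoopB html fuel (nextLinkB html endPos) (returnProperLinksA acc) =
        returnProperLinksA (returnLinksLoopA html fuel endPos acc) := by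
  induction fuel with
  | zero => intro endPos acc; rfl
  | succ fuel ih =>
    intro endPos acc
    simp only [returnLinksLoopA]
    rw [nextLinkB]
    by_cases h : PySem.Str.findFrom html "<a href=" endPos = -1
    · simp only [if_pos h, returnLinksLoopB]
    · simp only [if_neg h, returnLinksLoopB]
      rw [push_proper, ih]

-- ===== VERDICT (by name: the statement is the Claim_ definition above) =====
theorem returnLinks_spec : Claim_equal_returnLinks := by
  intro html _
  unfold Spec_returnLinks returnLinks returnLinks_alt
  rw [← loop_fusion]
  rfl
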